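-- pv_equiv track=rewrite | github.com/marhcouto/feup-ia | TP/4/1.py | incompatibilityTableGenerator
-- ===== SOURCE A (Python) =====
-- def incompatibilityTableGenerator(disciplineDict):
--
--     res = dict()
--
--     for i in range(0, len(disciplineDict)):
--         for j in range(i + 1, len(disciplineDict)):
--             disc1, students1 = list(disciplineDict.items())[i]
--             disc2, students2 = list(disciplineDict.items())[j]
--             res[(disc1, disc2)] = len(students1.intersection(students2))
--
--     return res
-- ===== SOURCE B (Python) =====
-- def allPairs(seq):
--     # ordered pairs (x, y) with x strictly before y in seq
--     if not seq:
--         return []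
--     head, rest = seq[0], seq[1:]
--     return [(head, y) for y in rest] + allPairs(rest)
--
--
-- def incompatibilityTableGenerator(disciplineDict):
--     names = list(disciplineDict)
--     res = {pair: 0 for pair in allPairs(names)}
--     byStudent = {}
--     for disc, students in disciplineDict.items():
--         for st in students:
--             byStudent[st] = byStudent.get(st, []) + [disc]
--     for discs in byStudent.values():
--         for pair in allPairs(discs):
--             res[pair] = res.get(pair, 0) + 1
--     return res
-- ===== Notes on version B (the rewrite author's own statement) =====
-- stated objective: faster
-- what changed: Replaces the nested index loops that rebuild the items list at every access and intersect every pair of student sets by an inverted student-to-disciplines index: all ordered discipline pairs are pre-initialised to 0 and each student's discipline list increments its pairs once per shared student.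
import Mathlib
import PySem

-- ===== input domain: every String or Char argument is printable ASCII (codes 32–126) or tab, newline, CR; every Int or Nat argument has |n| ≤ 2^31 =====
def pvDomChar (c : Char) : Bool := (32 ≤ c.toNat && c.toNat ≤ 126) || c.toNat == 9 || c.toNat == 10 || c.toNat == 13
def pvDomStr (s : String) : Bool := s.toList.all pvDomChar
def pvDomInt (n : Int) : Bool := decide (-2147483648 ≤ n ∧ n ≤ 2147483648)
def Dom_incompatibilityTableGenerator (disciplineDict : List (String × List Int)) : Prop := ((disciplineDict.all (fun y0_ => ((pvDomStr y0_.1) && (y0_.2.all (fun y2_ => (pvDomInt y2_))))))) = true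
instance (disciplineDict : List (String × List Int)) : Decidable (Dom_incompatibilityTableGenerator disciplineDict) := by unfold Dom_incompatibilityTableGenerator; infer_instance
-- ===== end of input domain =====

-- B replaces the pairwise set-intersection loops by an inverted student→disciplines index
-- (all pairs pre-initialised to 0, each student's discipline list increments its pairs);
-- same return value, a genuinely different traversal of the data.

-- ===== PORT A =====
-- literal port of A: for i in range(0, len(dd)): for j in range(i+1, len(dd)):
--   res[(items[i][0], items[j][0])] = len(items[i][1].intersection(items[j][1]))
def incompatibilityTableGenerator (disciplineDict : List (String × List Int)) : List (String × String × Int) :=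
  let res : PySem.Dict (String × String) Int :=
    (PySem.List.pyRange 0 (disciplineDict.length : Int) 1).foldl (fun res i =>
      (PySem.List.pyRange (i + 1) (disciplineDict.length : Int) 1).foldl (fun res j =>
        let p1 := PySem.List.pyGetD disciplineDict i ("", [])
        let p2 := PySem.List.pyGetD disciplineDict j ("", [])
        res.insert (p1.1, p2.1) (PySem.Set.len (PySem.Set.inter p1.2 p2.2))) res)
      PySem.Dict.empty
  res.items.map (fun q => (q.1.1, q.1.2, q.2))

-- ===== PORT B =====
-- helper of Source B: ordered pairs (x, y) with x strictly before y in seq (recursive)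
def pvAllPairs {α : Type} : List α → List (α × α)
  | [] => []
  | x :: rest => rest.map (fun y => (x, y)) ++ pvAllPairs rest

def incompatibilityTableGenerator_alt (disciplineDict : List (String × List Int)) : List (String × String × Int) :=
  let names := disciplineDict.map Prod.fst
  let res0 : PySem.Dict (String × String) Int :=
    (pvAllPairs names).foldl (fun d pr => d.insert pr 0) PySem.Dict.empty
  let byStudent : PySem.Dict Int (List String) :=
    disciplineDict.foldl (fun d p =>
      p.2.foldl (fun d st => d.modify st [] (· ++ [p.1])) d) PySem.Dict.empty
  let res : PySem.Dict (String × String) Int :=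
    byStudent.values.foldl (fun d discs =>
      (pvAllPairs discs).foldl (fun d pr => d.modify pr 0 (· + 1)) d) res0
  res.items.map (fun q => (q.1.1, q.1.2, q.2))

-- ===== PRECONDITION & SPEC =====
-- Pre_ states the representation invariant of A's Python input dict[str, set[int]]:
-- discipline names are unique (dict keys) and each student list has no duplicates (a set);
-- association lists violating it do not correspond to any input A can receive.
def Pre_incompatibilityTableGenerator (disciplineDict : List (String × List Int)) : Prop :=
  (disciplineDict.map Prod.fst).Nodup ∧ ∀ p ∈ disciplineDict, p.2.Nodup
instance (disciplineDict : List (String × List Int)) : Decidable (Pre_incompatibilityTableGenerator disciplineDict) := by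
  unfold Pre_incompatibilityTableGenerator; infer_instance

def pvWitness_incompatibilityTableGenerator : (List (String × List Int)) :=
  [("maths", [1, 2, 3]), ("physics", [2, 3, 4]), ("art", [5])]

def Spec_incompatibilityTableGenerator (disciplineDict : List (String × List Int)) (out : List (String × String × Int)) : Prop := out = incompatibilityTableGenerator_alt disciplineDict
instance (disciplineDict : List (String × List Int)) (out : List (String × String × Int)) : Decidable (Spec_incompatibilityTableGenerator disciplineDict out) := by unfold Spec_incompatibilityTableGenerator; infer_instance

-- ===== CLAIM (what is proved, stated in full; the proofs are below) =====
def Claim_equal_incompatibilityTableGenerator : Prop := ∀ (disciplineDict : List (String × List Int)), Dom_incompatibilityTableGenerator disciplineDict → Pre_incompatibilityTableGenerator disciplineDict → Spec_incompatibilityTableGenerator disciplineDict (incompatibilityTableGenerator disciplineDict)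

-- ===== LEMMAS AND PROOFS =====

-- canonical "for each x, for each later y" fold (shape of A's double index loop)
def pvPairFold {α σ : Type} (g : σ → α → α → σ) : σ → List α → σ
  | acc, [] => acc
  | acc, x :: r => pvPairFold g (r.foldl (fun a y => g a x y) acc) r

-- the (student, discipline) event list of B's inverted-index phase
def pvEvents (dd : List (String × List Int)) : List (Int × String) :=
  dd.flatMap (fun p => p.2.map (fun st => (st, p.1)))

-- disciplines containing student st, in input order
def pvDiscsOf (st : Int) (dd : List (String × List Int)) : List String :=
  (dd.filter (fun p => p.2.contains st)).map Prod.fst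

theorem pvPairFold_eq_foldl {α σ : Type} (g2 : σ → α × α → σ) (xs : List α) (init : σ) :
    pvPairFold (fun a x y => g2 a (x, y)) init xs = (pvAllPairs xs).foldl g2 init := by
  induction xs generalizing init with
  | nil => rfl
  | cons x r ih => simp [pvPairFold, pvAllPairs, List.foldl_append, List.foldl_map, ih]

theorem pvIndexLoops_eq_pairFold {α σ : Type} (xs : List α) (d : α) (g : σ → α → α → σ) :
    ∀ (m k : Nat), xs.length - k = m → ∀ (init : σ),
      (PySem.List.pyRange (k : Int) (xs.length : Int) 1).foldl
        (fun acc i => (PySem.List.pyRange (i + 1) (xs.length : Int) 1).foldl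
          (fun acc j => g acc (PySem.List.pyGetD xs i d) (PySem.List.pyGetD xs j d)) acc) init
      = pvPairFold g init (xs.drop k) := by
  intro m
  induction m with
  | zero =>
    intro k hk init
    rw [PySem.List.pyRange_one_eq_nil (by omega), List.drop_eq_nil_of_le (by omega)]
    rfl
  | succ m ih =>
    intro k hk init
    have hklt : k < xs.length := by omega
    rw [PySem.List.pyRange_one_cons (by exact_mod_cast hklt), List.foldl_cons]
    have hdrop : xs.drop k = xs[k] :: xs.drop (k + 1) := List.drop_eq_getElem_cons hklt
    have hinner : (PySem.List.pyRange ((k : Int) + 1) (xs.length : Int) 1).foldl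
          (fun acc j => g acc (PySem.List.pyGetD xs (k : Int) d) (PySem.List.pyGetD xs j d)) init
        = (xs.drop (k + 1)).foldl (fun a y => g a xs[k] y) init := by
      have h1 : ((k : Int) + 1) = ((k + 1 : Nat) : Int) := by push_cast; ring
      rw [h1, PySem.List.foldl_pyRange_pyGetD' xs d
        (fun a y => g a (PySem.List.pyGetD xs (k : Int) d) y) init (by positivity)]
      simp [PySem.List.pyGetD_natCast, List.getElem?_eq_getElem hklt]
    rw [hinner, hdrop]
    have := ih (k + 1) (by omega) ((xs.drop (k + 1)).foldl (fun a y => g a xs[k] y) init)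
    rw [show ((k : Int) + 1) = ((k + 1 : Nat) : Int) by push_cast; ring] at *
    rw [this]
    rfl

theorem pvMem_allPairs_fst_snd {α : Type} {pr : α × α} {xs : List α}
    (h : pr ∈ pvAllPairs xs) : pr.1 ∈ xs ∧ pr.2 ∈ xs := by
  induction xs with
  | nil => simp [pvAllPairs] at h
  | cons x r ih =>
    simp only [pvAllPairs, List.mem_append, List.mem_map] at h
    rcases h with ⟨y, hy, rfl⟩ | h
    · exact ⟨List.mem_cons_self, List.mem_cons_of_mem _ hy⟩
    · exact ⟨List.mem_cons_of_mem _ (ih h).1, List.mem_cons_of_mem _ (ih h).2⟩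

theorem pvSublist_of_mem_allPairs {α : Type} {pr : α × α} {xs : List α}
    (h : pr ∈ pvAllPairs xs) : [pr.1, pr.2].Sublist xs := by
  induction xs with
  | nil => simp [pvAllPairs] at h
  | cons x r ih =>
    simp only [pvAllPairs, List.mem_append, List.mem_map] at h
    rcases h with ⟨y, hy, rfl⟩ | h
    · exact List.cons_sublist_cons.mpr (List.singleton_sublist.mpr hy)
    · exact (ih h).cons x

theorem pvMem_allPairs_of_sublist {α : Type} {a b : α} {xs : List α}
    (h : [a, b].Sublist xs) : (a, b) ∈ pvAllPairs xs := by
  induction xs with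
  | nil => simp at h
  | cons x r ih =>
    rcases List.sublist_cons_iff.mp h with h' | ⟨rest, heq, hsub⟩
    · simp only [pvAllPairs, List.mem_append]; exact Or.inr (ih h')
    · cases heq
      simp only [pvAllPairs, List.mem_append, List.mem_map]
      exact Or.inl ⟨b, List.singleton_sublist.mp hsub, rfl⟩

theorem pvAllPairs_map {α β : Type} (f : α → β) (xs : List α) :
    pvAllPairs (xs.map f) = (pvAllPairs xs).map (fun pr => (f pr.1, f pr.2)) := by
  induction xs with
  | nil => rfl
  | cons x r ih => simp [pvAllPairs, ih, List.map_map]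

theorem pvNodup_allPairs {α : Type} [DecidableEq α] {xs : List α} (h : xs.Nodup) :
    (pvAllPairs xs).Nodup := by
  induction xs with
  | nil => simp [pvAllPairs]
  | cons x r ih =>
    rcases List.nodup_cons.mp h with ⟨hx, hr⟩
    refine List.Nodup.append ?_ (ih hr) ?_
    · exact hr.map (fun a b hab => (Prod.mk.injEq _ _ _ _).mp hab |>.2)
    · intro pr h1 h2
      rcases List.mem_map.mp h1 with ⟨y, _, rfl⟩
      exact hx ((pvMem_allPairs_fst_snd h2).1)

theorem pvCount_flatMap {α β : Type} [BEq β] (l : List α) (f : α → List β) (x : β) :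
    (l.flatMap f).count x = (l.map (fun a => (f a).count x)).sum := by
  induction l with
  | nil => rfl
  | cons a l ih => simp [List.flatMap_cons, List.count_append, ih]

theorem pvCount_allPairs {α : Type} [DecidableEq α] {xs : List α} (h : xs.Nodup) (a b : α) :
    (pvAllPairs xs).count (a, b) = if [a, b].Sublist xs then 1 else 0 := by
  induction xs with
  | nil => simp [pvAllPairs]
  | cons x r ih =>
    rcases List.nodup_cons.mp h with ⟨hx, hr⟩
    have hmapcnt : (r.map (fun y => (x, y))).count (a, b) = if x = a then r.count b else 0 := by
      by_cases hxa : x = a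
      · subst hxa
        simp only [List.count, List.countP_map, if_pos]
        apply List.countP_congr
        intro y _
        by_cases hyb : y = b <;> simp [hyb]
      · simp only [List.count, List.countP_map, if_neg hxa]
        rw [List.countP_eq_zero]
        intro y _
        simp [hxa]
    rw [pvAllPairs, List.count_append, hmapcnt, ih hr]
    by_cases hxa : x = a
    · subst hxa
      have hnot : ¬ [x, b].Sublist r := fun hs => hx (hs.subset List.mem_cons_self)
      rw [if_neg hnot]
      have hiff : [x, b].Sublist (x :: r) ↔ b ∈ r := by
        rw [List.sublist_cons_iff]
        constructor
        · rintro (h' | ⟨rest, heq, hsub⟩)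
          · exact absurd h' hnot
          · cases heq; exact List.singleton_sublist.mp hsub
        · intro hb; exact Or.inr ⟨[b], rfl, List.singleton_sublist.mpr hb⟩
      by_cases hb : b ∈ r
      · rw [if_pos rfl, List.count_eq_one_of_mem hr hb, if_pos (hiff.mpr hb)]
      · rw [if_pos rfl, List.count_eq_zero_of_not_mem hb, if_neg (fun hs => hb (hiff.mp hs))]
    · have hiff : [a, b].Sublist (x :: r) ↔ [a, b].Sublist r := by
        rw [List.sublist_cons_iff]
        constructor
        · rintro (h' | ⟨rest, heq, hsub⟩)
          · exact h'
          · cases heq; exact absurd rfl hxa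
        · exact Or.inl
      rw [if_neg hxa]
      simp [hiff]

theorem pvFilter_beq_of_nodup {l : List Int} (h : l.Nodup) (a : Int) :
    l.filter (fun x => x == a) = if a ∈ l then [a] else [] := by
  induction l with
  | nil => simp
  | cons x l ih =>
    rcases List.nodup_cons.mp h with ⟨hx, hl⟩
    by_cases hxa : x = a
    · subst hxa; simp [hx, ih hl]
    · simp [hxa, ih hl, Ne.symm hxa]

theorem pvDiscsOf_cons (st : Int) (p : String × List Int) (dd : List (String × List Int)) :
    pvDiscsOf st (p :: dd) = (if st ∈ p.2 then [p.1] else []) ++ pvDiscsOf st dd := by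
  unfold pvDiscsOf
  by_cases h : st ∈ p.2 <;> simp [h]

theorem pvDiscsOf_eq (dd : List (String × List Int)) (hnd : ∀ p ∈ dd, p.2.Nodup) (st : Int) :
    ((pvEvents dd).filter (fun e => e.1 == st)).map (fun e => e.2) = pvDiscsOf st dd := by
  induction dd with
  | nil => rfl
  | cons p dd ih =>
    have hp2 : p.2.Nodup := hnd p List.mem_cons_self
    have hrest : ∀ q ∈ dd, q.2.Nodup := fun q hq => hnd q (List.mem_cons_of_mem _ hq)
    rw [pvDiscsOf_cons]
    show ((p.2.map (fun st' => (st', p.1)) ++ pvEvents dd).filter (fun e => e.1 == st)).map (fun e => e.2) = _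
    rw [List.filter_append, List.map_append, ih hrest]
    congr 1
    rw [List.filter_map, show ((fun (e : Int × String) => e.1 == st) ∘ (fun st' => (st', p.1))) = (fun x => x == st) from rfl,
      pvFilter_beq_of_nodup hp2 st]
    by_cases h : st ∈ p.2 <;> simp [h]

theorem pvMem_discsOf {st : Int} {dd : List (String × List Int)} {a : String} :
    a ∈ pvDiscsOf st dd ↔ ∃ r ∈ dd, st ∈ r.2 ∧ r.1 = a := by
  unfold pvDiscsOf
  simp [List.mem_filter]

theorem pvSublist_discsOf_iff {dd : List (String × List Int)} {p q : String × List Int}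
    (hnames : (dd.map Prod.fst).Nodup) (hsub : [p, q].Sublist dd) (st : Int) :
    [p.1, q.1].Sublist (pvDiscsOf st dd) ↔ (st ∈ p.2 ∧ st ∈ q.2) := by
  have hpm : p ∈ dd := hsub.subset List.mem_cons_self
  have hqm : q ∈ dd := hsub.subset (List.mem_cons_of_mem _ List.mem_cons_self)
  constructor
  · intro h
    have h1 : p.1 ∈ pvDiscsOf st dd := h.subset List.mem_cons_self
    have h2 : q.1 ∈ pvDiscsOf st dd := h.subset (List.mem_cons_of_mem _ List.mem_cons_self)
    rcases pvMem_discsOf.mp h1 with ⟨r, hr, hstr, hr1⟩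
    rcases pvMem_discsOf.mp h2 with ⟨r', hr', hstr', hr1'⟩
    have : r = p := List.inj_on_of_nodup_map hnames hr hpm hr1
    have : r' = q := List.inj_on_of_nodup_map hnames hr' hqm hr1'
    subst_vars
    exact ⟨hstr, hstr'⟩
  · rintro ⟨hp2, hq2⟩
    clear hnames hpm hqm
    induction dd with
    | nil => simp at hsub
    | cons r dd ih =>
      rw [pvDiscsOf_cons]
      rcases List.sublist_cons_iff.mp hsub with h' | ⟨rest, heq, hsub'⟩
      · exact (ih h').trans (List.sublist_append_right _ _)
      · cases heq
        rw [if_pos hp2]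
        have hq1 : q.1 ∈ pvDiscsOf st dd := by
          have : q ∈ dd := hsub'.subset List.mem_cons_self
          exact pvMem_discsOf.mpr ⟨q, this, hq2, rfl⟩
        exact List.cons_sublist_cons.mpr (List.singleton_sublist.mpr hq1)

theorem pvPairFold_eq_foldl' {α σ : Type} (g : σ → α → α → σ) (g2 : σ → α × α → σ)
    (hg : ∀ a x y, g a x y = g2 a (x, y)) (xs : List α) (init : σ) :
    pvPairFold g init xs = (pvAllPairs xs).foldl g2 init := by
  have hgf : g = fun a x y => g2 a (x, y) := by funext a x y; exact hg a x y
  subst hgf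
  exact pvPairFold_eq_foldl g2 xs init

theorem pvMain (dd : List (String × List Int))
    (hnames : (dd.map Prod.fst).Nodup) (hnd : ∀ p ∈ dd, p.2.Nodup) :
    incompatibilityTableGenerator dd = incompatibilityTableGenerator_alt dd := by
  classical
  have hnodupPairs : (pvAllPairs (dd.map Prod.fst)).Nodup := pvNodup_allPairs hnames
  have hmapk : (pvAllPairs dd).map (fun pr => (pr.1.1, pr.2.1)) = pvAllPairs (dd.map Prod.fst) :=
    (pvAllPairs_map Prod.fst dd).symm
  -- ===== A side =====
  have h0 := pvIndexLoops_eq_pairFold dd ("", ([] : List Int))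
    (fun (res : PySem.Dict (String × String) Int) p q =>
      res.insert (p.1, q.1) (PySem.Set.len (PySem.Set.inter p.2 q.2)))
    dd.length 0 (by omega) PySem.Dict.empty
  rw [List.drop_zero] at h0
  have hA : incompatibilityTableGenerator dd
      = (pvPairFold (fun (res : PySem.Dict (String × String) Int) p q =>
          res.insert (p.1, q.1) (PySem.Set.len (PySem.Set.inter p.2 q.2))) PySem.Dict.empty dd).items.map
            (fun q => (q.1.1, q.1.2, q.2)) :=
    congrArg (fun d : PySem.Dict (String × String) Int =>
      d.items.map (fun q : (String × String) × Int => (q.1.1, q.1.2, q.2))) h0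
  rw [pvPairFold_eq_foldl'
    (fun (res : PySem.Dict (String × String) Int) p q =>
      res.insert (p.1, q.1) (PySem.Set.len (PySem.Set.inter p.2 q.2)))
    (fun res pr => res.insert (pr.1.1, pr.2.1) (PySem.Set.len (PySem.Set.inter pr.1.2 pr.2.2)))
    (fun a x y => rfl) dd PySem.Dict.empty] at hA
  rw [PySem.Dict.items_foldl_insert_fresh (pvAllPairs dd)
    (fun pr => (pr.1.1, pr.2.1))
    (fun pr => PySem.Set.len (PySem.Set.inter pr.1.2 pr.2.2))
    PySem.Dict.empty (fun a _ => by simp [PySem.Dict.contains_empty]) (hmapk ▸ hnodupPairs),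
    show (PySem.Dict.empty : PySem.Dict (String × String) Int).items = [] from rfl,
    List.nil_append] at hA
  -- ===== B side =====
  set BS := dd.foldl (fun d p => p.2.foldl (fun d st => d.modify st [] (· ++ [p.1])) d)
    (PySem.Dict.empty : PySem.Dict Int (List String)) with hBS
  set R0 := (pvAllPairs (dd.map Prod.fst)).foldl (fun d pr => d.insert pr 0)
    (PySem.Dict.empty : PySem.Dict (String × String) Int) with hR0
  set R := BS.values.foldl (fun d discs =>
    (pvAllPairs discs).foldl (fun d pr => d.modify pr 0 (· + 1)) d) R0 with hRdef
  have hBdef : incompatibilityTableGenerator_alt dd = R.items.map (fun q => (q.1.1, q.1.2, q.2)) := rfl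
  -- byStudent as a single fold over the event list
  have hflat : ∀ (l : List (String × List Int)) (d0 : PySem.Dict Int (List String)),
      l.foldl (fun d p => p.2.foldl (fun d st => d.modify st [] (· ++ [p.1])) d) d0
        = (pvEvents l).foldl (fun d e => d.modify e.1 [] (· ++ [e.2])) d0 := by
    intro l
    induction l with
    | nil => intro d0; rfl
    | cons p l ih =>
      intro d0
      show (l.foldl _ (p.2.foldl (fun d st => d.modify st [] (· ++ [p.1])) d0)) = _
      rw [ih, show pvEvents (p :: l) = p.2.map (fun st => (st, p.1)) ++ pvEvents l from rfl,
        List.foldl_append, List.foldl_map]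
  have hkeysBS : BS.keys = PySem.Set.ofList ((pvEvents dd).map Prod.fst) := by
    rw [hBS, hflat]
    rw [PySem.Dict.keys_foldl_modify_key (pvEvents dd) Prod.fst ([] : List String)
      (fun _ e => (· ++ [e.2])) PySem.Dict.empty]
    rw [PySem.Dict.keys_empty, PySem.Set.update_nil_left]
  have hkeysBSnodup : BS.keys.Nodup := by rw [hkeysBS]; exact PySem.Set.nodup_ofList _
  have hvals : BS.values
      = (PySem.Set.ofList ((pvEvents dd).map Prod.fst)).map (fun st => pvDiscsOf st dd) := by
    rw [PySem.Dict.values_eq_map_keys BS hkeysBSnodup [], hkeysBS]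
    apply List.map_congr_left
    intro st _
    rw [hBS, hflat, PySem.Dict.getD_foldl_modify_append (pvEvents dd) PySem.Dict.empty st]
    rw [PySem.Dict.getD_empty, List.nil_append]
    exact pvDiscsOf_eq dd hnd st
  -- res0 items / keys
  have hitems0 : R0.items = (pvAllPairs (dd.map Prod.fst)).map (fun k => (k, (0 : Int))) := by
    rw [hR0]
    rw [PySem.Dict.items_foldl_insert_fresh (pvAllPairs (dd.map Prod.fst))
      (fun pr => pr) (fun _ => (0 : Int)) PySem.Dict.empty
      (fun a _ => by simp [PySem.Dict.contains_empty]) (by simpa using hnodupPairs)]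
    rfl
  have hkeys0 : R0.keys = pvAllPairs (dd.map Prod.fst) := by
    show R0.items.map Prod.fst = _
    rw [hitems0, List.map_map]
    simp [Function.comp_def]
  -- the flattened pair-event list
  set PE := BS.values.flatMap pvAllPairs with hPE
  have hres : R = PE.foldl (fun d pr => d.modify pr 0 (· + 1)) R0 := by
    rw [hPE, List.foldl_flatMap]
  have hPEmem : ∀ y ∈ PE, y ∈ pvAllPairs (dd.map Prod.fst) := by
    intro y hy
    rw [hPE, hvals] at hy
    rcases List.mem_flatMap.mp hy with ⟨discs, hdiscs, hyp⟩
    rcases List.mem_map.mp hdiscs with ⟨st, _, rfl⟩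
    have hsub1 : [y.1, y.2].Sublist (pvDiscsOf st dd) := pvSublist_of_mem_allPairs hyp
    have hsub2 : (pvDiscsOf st dd).Sublist (dd.map Prod.fst) := by
      unfold pvDiscsOf
      exact (List.filter_sublist).map Prod.fst
    have := pvMem_allPairs_of_sublist (hsub1.trans hsub2)
    simpa using this
  have hkeysR : R.keys = pvAllPairs (dd.map Prod.fst) := by
    rw [hres, PySem.Dict.keys_foldl_modify PE 0 (fun _ _ => (· + 1)) R0,
      PySem.Set.update_eq_append_filter, hkeys0]
    have : ((PySem.Set.ofList PE).filter (fun y => !(PySem.Set.contains (pvAllPairs (dd.map Prod.fst)) y))) = [] := by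
      rw [List.filter_eq_nil_iff]
      intro y hy
      have hmem : y ∈ pvAllPairs (dd.map Prod.fst) := hPEmem y ((PySem.Set.mem_ofList _ _).mp hy)
      simpa using hmem
    rw [this, List.append_nil]
  have hgetD : ∀ k ∈ pvAllPairs (dd.map Prod.fst), R.getD k 0 = (PE.count k : Int) := by
    intro k hk
    rw [hres, PySem.Dict.getD_foldl_modify_add_one PE R0 k]
    have h00 : R0.getD k 0 = 0 := by
      refine PySem.Dict.getD_of_mem_items R0 ?_ (by rw [hkeys0]; exact hnodupPairs) 0
      rw [hitems0]
      exact List.mem_map.mpr ⟨k, hk, rfl⟩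
    rw [h00, zero_add]
  have hBitems : R.items = (pvAllPairs (dd.map Prod.fst)).map (fun k => (k, (PE.count k : Int))) := by
    rw [PySem.Dict.items_eq_map_keys R (by rw [hkeysR]; exact hnodupPairs) 0, hkeysR]
    exact List.map_congr_left (fun k hk => by rw [hgetD k hk])
  -- ===== the counting argument =====
  set students := PySem.Set.ofList ((pvEvents dd).map Prod.fst) with hstud
  have hstudNodup : students.Nodup := PySem.Set.nodup_ofList _
  have hstudMem : ∀ (x : Int) (p : String × List Int), p ∈ dd → x ∈ p.2 → x ∈ students := by
    intro x p hp hx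
    rw [hstud]
    refine (PySem.Set.mem_ofList _ _).mpr ?_
    exact List.mem_map.mpr ⟨(x, p.1), List.mem_flatMap.mpr ⟨p, hp, List.mem_map.mpr ⟨x, hx, rfl⟩⟩, rfl⟩
  have hcount : ∀ pr ∈ pvAllPairs dd,
      (PE.count (pr.1.1, pr.2.1) : Int) = PySem.Set.len (PySem.Set.inter pr.1.2 pr.2.2) := by
    intro pr hmem
    have hsubdd : [pr.1, pr.2].Sublist dd := pvSublist_of_mem_allPairs hmem
    have hp1 : pr.1 ∈ dd := hsubdd.subset List.mem_cons_self
    have hp2 : pr.2 ∈ dd := hsubdd.subset (List.mem_cons_of_mem _ List.mem_cons_self)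
    have hPEc : PE.count (pr.1.1, pr.2.1)
        = (students.map (fun st => (pvAllPairs (pvDiscsOf st dd)).count (pr.1.1, pr.2.1))).sum := by
      rw [hPE, hvals, pvCount_flatMap, List.map_map]
      rfl
    have hper : ∀ st ∈ students, (pvAllPairs (pvDiscsOf st dd)).count (pr.1.1, pr.2.1)
        = if st ∈ pr.1.2 ∧ st ∈ pr.2.2 then 1 else 0 := by
      intro st _
      have hdnodup : (pvDiscsOf st dd).Nodup := by
        refine hnames.sublist ?_
        unfold pvDiscsOf
        exact (List.filter_sublist).map Prod.fst
      rw [pvCount_allPairs hdnodup pr.1.1 pr.2.1]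
      exact if_congr (pvSublist_discsOf_iff hnames hsubdd st) rfl rfl
    rw [hPEc, List.map_congr_left hper,
      PySem.List.sum_map_ite_one_zero_nat' (fun st => st ∈ pr.1.2 ∧ st ∈ pr.2.2) students,
      List.countP_eq_length_filter]
    have hperm : (students.filter (fun st => decide (st ∈ pr.1.2 ∧ st ∈ pr.2.2))).Perm
        (PySem.Set.inter pr.1.2 pr.2.2) := by
      rw [List.perm_ext_iff_of_nodup (hstudNodup.filter _)
        (PySem.Set.nodup_inter _ _ (hnd pr.1 hp1))]
      intro x
      rw [List.mem_filter, PySem.Set.mem_inter]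
      constructor
      · rintro ⟨_, hx⟩
        exact of_decide_eq_true hx
      · rintro ⟨hx1, hx2⟩
        exact ⟨hstudMem x pr.1 hp1 hx1, decide_eq_true ⟨hx1, hx2⟩⟩
    rw [hperm.length_eq]
    simp [PySem.Set.len]
  -- ===== assemble =====
  rw [hA, hBdef, hBitems, ← hmapk, List.map_map, List.map_map, List.map_map]
  apply List.map_congr_left
  intro pr hpr
  simp only [Function.comp]
  rw [hcount pr hpr]

-- ===== VERDICT (by name: the statement is the Claim_ definition above) =====
theorem incompatibilityTableGenerator_spec : Claim_equal_incompatibilityTableGenerator := by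
  intro dd _ hpre
  unfold Spec_incompatibilityTableGenerator
  exact pvMain dd hpre.1 hpre.2
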